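-- pv_equiv track=rewrite | github.com/BaiduEffeciencyCloud/rag-wh40k-folk | intent_training/utils/quick_conll_generator.py | _classify_by_intent
-- ===== SOURCE A (Python) =====
-- from typing import List, Dict, Tuple
--
-- def _classify_by_intent(texts: List[str], intents: List[str]) -> Dict[str, List[str]]:
--     """按意图分类文本"""
--     classified = {
--         "query": [],
--         "rule": [],
--         "list": [],
--         "compare": []
--     }
--
--     for text, intent in zip(texts, intents):
--         if intent in classified:
--             classified[intent].append(text)
--         else:
--             classified["query"].append(text)
--
--     return classified
-- ===== SOURCE B (Python) =====
-- def _classify_by_intent(texts, intents):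
--     """Group texts into fixed buckets, one filtering pass per category."""
--     categories = ["query", "rule", "list", "compare"]
--     valid = set(categories)
--     pairs = list(zip(texts, intents))
--     return {
--         c: [t for t, i in pairs if i == c or (c == "query" and i not in valid)]
--         for c in categories
--     }
-- ===== Notes on version B (the rewrite author's own statement) =====
-- stated objective: alternative
-- what changed: Replaces the single dispatching loop that mutates a pre-built dict with a dict comprehension over the fixed category list, building each bucket by its own filtering pass over the zipped (text, intent) pairs ('query' absorbing unknown intents).
import Mathlib
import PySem

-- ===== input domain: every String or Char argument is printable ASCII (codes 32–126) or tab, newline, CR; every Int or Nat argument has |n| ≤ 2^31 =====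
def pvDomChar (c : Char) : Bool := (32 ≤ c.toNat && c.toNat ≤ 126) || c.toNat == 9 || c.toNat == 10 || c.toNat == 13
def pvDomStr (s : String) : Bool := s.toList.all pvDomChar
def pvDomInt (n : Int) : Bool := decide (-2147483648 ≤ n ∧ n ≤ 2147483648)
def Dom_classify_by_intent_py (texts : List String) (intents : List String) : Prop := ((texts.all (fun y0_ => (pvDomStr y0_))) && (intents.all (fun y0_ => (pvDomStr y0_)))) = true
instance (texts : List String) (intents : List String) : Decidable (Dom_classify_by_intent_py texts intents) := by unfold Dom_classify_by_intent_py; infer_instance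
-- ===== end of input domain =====

-- B builds each bucket with its own filtering pass over the zipped pairs instead of
-- A's single dispatching loop mutating a pre-built dict; same values, alternative structure.

-- ===== PORT A =====
-- loop body of A's for-loop, named so the proofs can talk about one step
def pvStepA (d : PySem.Dict String (List String)) (ti : String × String) : PySem.Dict String (List String) :=
  if d.contains ti.2 then d.modify ti.2 [] (· ++ [ti.1])
  else d.modify "query" [] (· ++ [ti.1])

def classify_by_intent_py (texts : List String) (intents : List String) : List (String × List String) :=
  let classified : PySem.Dict String (List String) :=
    PySem.Dict.ofList [("query", []), ("rule", []), ("list", []), ("compare", [])]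
  let classified := (texts.zip intents).foldl pvStepA classified
  classified.items

-- ===== PORT B =====
def pvCategories : List String := ["query", "rule", "list", "compare"]

def classify_by_intent_py_alt (texts : List String) (intents : List String) : List (String × List String) :=
  let pairs := texts.zip intents
  pvCategories.map (fun c =>
    (c, (pairs.filter (fun p => p.2 == c || (c == "query" && !(pvCategories.contains p.2)))).map (·.1)))

-- ===== PRECONDITION & SPEC =====
def Spec_classify_by_intent_py (texts : List String) (intents : List String) (out : List (String × List String)) : Prop := out = classify_by_intent_py_alt texts intents
instance (texts : List String) (intents : List String) (out : List (String × List String)) : Decidable (Spec_classify_by_intent_py texts intents out) := by unfold Spec_classify_by_intent_py; infer_instance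

-- ===== CLAIM (what is proved, stated in full; the proofs are below) =====
def Claim_equal_classify_by_intent_py : Prop := ∀ (texts : List String) (intents : List String), Dom_classify_by_intent_py texts intents → Spec_classify_by_intent_py texts intents (classify_by_intent_py texts intents)

-- ===== LEMMAS AND PROOFS =====

-- one loop step on an intent outside the four fixed categories appends to "query"
theorem pvStepA_unknown (q r li c : List String) (t i : String)
    (h1 : ¬ i = "query") (h2 : ¬ i = "rule") (h3 : ¬ i = "list") (h4 : ¬ i = "compare") :
    pvStepA (PySem.Dict.mk [("query", q), ("rule", r), ("list", li), ("compare", c)]) (t, i) =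
    PySem.Dict.mk [("query", q ++ [t]), ("rule", r), ("list", li), ("compare", c)] := by
  have hc : (PySem.Dict.mk [("query", q), ("rule", r), ("list", li), ("compare", c)]).contains i = false := by
    simp [PySem.Dict.contains_mk]
    exact ⟨Ne.symm h1, Ne.symm h2, Ne.symm h3, Ne.symm h4⟩
  unfold pvStepA
  rw [hc]
  rfl

-- The invariant: running A's loop from an arbitrary 4-bucket dict appends, to each
-- bucket, exactly the texts B's per-category filter selects.
theorem classify_fold_invariant (l : List (String × String)) (q r li c : List String) :
    l.foldl pvStepA (PySem.Dict.mk [("query", q), ("rule", r), ("list", li), ("compare", c)]) =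
    PySem.Dict.mk
      [("query", q ++ (l.filter (fun p => p.2 == "query" || !(pvCategories.contains p.2))).map (·.1)),
       ("rule", r ++ (l.filter (fun p => p.2 == "rule")).map (·.1)),
       ("list", li ++ (l.filter (fun p => p.2 == "list")).map (·.1)),
       ("compare", c ++ (l.filter (fun p => p.2 == "compare")).map (·.1))] := by
  induction l generalizing q r li c with
  | nil => simp
  | cons hd tl ih =>
    obtain ⟨t, i⟩ := hd
    rw [List.foldl_cons]
    by_cases h1 : i = "query"
    · subst h1
      rw [show pvStepA (PySem.Dict.mk [("query", q), ("rule", r), ("list", li), ("compare", c)]) (t, "query") =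
          PySem.Dict.mk [("query", q ++ [t]), ("rule", r), ("list", li), ("compare", c)] from rfl, ih]
      simp [pvCategories]
    · by_cases h2 : i = "rule"
      · subst h2
        rw [show pvStepA (PySem.Dict.mk [("query", q), ("rule", r), ("list", li), ("compare", c)]) (t, "rule") =
            PySem.Dict.mk [("query", q), ("rule", r ++ [t]), ("list", li), ("compare", c)] from rfl, ih]
        simp [pvCategories]
      · by_cases h3 : i = "list"
        · subst h3
          rw [show pvStepA (PySem.Dict.mk [("query", q), ("rule", r), ("list", li), ("compare", c)]) (t, "list") =
              PySem.Dict.mk [("query", q), ("rule", r), ("list", li ++ [t]), ("compare", c)] from rfl, ih]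
          simp [pvCategories]
        · by_cases h4 : i = "compare"
          · subst h4
            rw [show pvStepA (PySem.Dict.mk [("query", q), ("rule", r), ("list", li), ("compare", c)]) (t, "compare") =
                PySem.Dict.mk [("query", q), ("rule", r), ("list", li), ("compare", c ++ [t])] from rfl, ih]
            simp [pvCategories]
          · rw [pvStepA_unknown q r li c t i h1 h2 h3 h4, ih]
            simp [pvCategories, h1, h2, h3, h4]

-- ===== VERDICT (by name: the statement is the Claim_ definition above) =====
theorem classify_by_intent_py_spec : Claim_equal_classify_by_intent_py := by
  intro texts intents _
  show ((texts.zip intents).foldl pvStepA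
      (PySem.Dict.ofList [("query", []), ("rule", []), ("list", []), ("compare", [])])).items =
    classify_by_intent_py_alt texts intents
  rw [show (PySem.Dict.ofList [("query", ([] : List String)), ("rule", []), ("list", []), ("compare", [])]) =
      PySem.Dict.mk [("query", []), ("rule", []), ("list", []), ("compare", [])] from rfl,
    classify_fold_invariant]
  simp [classify_by_intent_py_alt, pvCategories]
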